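-- pv_equiv track=rewrite | github.com/pah8p/Project-Euler | problem_95.py | divisors_to
-- ===== SOURCE A (Python) =====
-- def divisors_to(n):
--
--     d = []
--     for i in range(n):
--         d.append([])
--
--     for i in range(1, int(n/2+1)):
--         j = 2
--         while i*j < n:
--             d[i*j].append(i)
--             j += 1
--
--     return d
-- ===== SOURCE B (Python) =====
-- def divisors_to(n):
--     d = []
--     for m in range(n):
--         small = []
--         large = []
--         i = 1
--         while i * i <= m:
--             if m % i == 0:
--                 if i != m:
--                     small.append(i)
--                 c = m // i
--                 if c != i and c != m:
--                     large.append(c)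
--             i += 1
--         large.reverse()
--         d.append(small + large)
--     return d
-- ===== Notes on version B (the rewrite author's own statement) =====
-- stated objective: alternative
-- what changed: A fills a shared table with a divisor sieve (outer loop over each divisor i, inner while-loop walking its multiples and appending i into d[i*j]); B computes each row independently by sqrt-bounded trial division of m: it collects small divisors i with i*i <= m and their cofactors m//i, reverses the cofactor list and concatenates, never touching any other row.
import Mathlib
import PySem

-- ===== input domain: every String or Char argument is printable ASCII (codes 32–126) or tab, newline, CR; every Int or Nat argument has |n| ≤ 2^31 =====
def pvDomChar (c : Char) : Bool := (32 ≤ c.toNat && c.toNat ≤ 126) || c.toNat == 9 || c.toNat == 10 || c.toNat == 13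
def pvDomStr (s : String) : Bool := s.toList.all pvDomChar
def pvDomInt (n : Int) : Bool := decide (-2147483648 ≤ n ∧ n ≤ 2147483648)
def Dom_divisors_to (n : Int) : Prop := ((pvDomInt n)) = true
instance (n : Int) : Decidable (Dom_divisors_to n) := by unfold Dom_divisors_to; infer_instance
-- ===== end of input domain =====

-- B replaces A's divisor sieve with per-number sqrt-bounded trial division (alternative algorithm).

-- ===== PORT A =====
-- inner 'while i*j < n: d[i*j].append(i); j += 1'.  The '0 < i' conjunct is a pure
-- termination guard: every call has i ≥ 1 (i ranges over range(1, int(n/2+1))).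
-- d[i*j] uses .toNat: in every executed iteration i*j ≥ 2, so no negative wraparound occurs.
def divisorsInner (n i j : Int) (d : List (List Int)) : List (List Int) :=
  if h : 0 < i ∧ i * j < n then
    divisorsInner n i (j + 1) (d.modify (i * j).toNat (fun l => l ++ [i]))
  else d
termination_by (n - i * j).toNat
decreasing_by
  have h1 : i * (j + 1) = i * j + i := by ring
  rw [h1]; omega

-- int(n/2+1): on the domain |n| ≤ 2^31 the float arithmetic n/2+1 is exact and equals
-- (n+2)/2, so int(n/2+1) = truncdiv (n+2) 2 exactly.
def divisors_to (n : Int) : List (List Int) :=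
  let d := (PySem.List.pyRange 0 n).foldl (fun d _ => d ++ [([] : List Int)]) []
  (PySem.List.pyRange 1 (PySem.Int.truncdiv (n + 2) 2)).foldl (fun d i => divisorsInner n i 2 d) d

-- ===== PORT B =====
-- 'while i*i <= m: if m % i == 0: (if i != m: small.append(i)); c = m//i;
--  (if c != i and c != m: large.append(c)); i += 1'.  '0 < i' is a pure termination
-- guard: every call has i >= 1.
def trialLoop (m i : Int) (small large : List Int) : List Int × List Int :=
  if h : 0 < i ∧ i * i ≤ m then
    if PySem.Int.mod m i == 0 then
      trialLoop m (i + 1)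
        (if i ≠ m then small ++ [i] else small)
        (if PySem.Int.floordiv m i ≠ i ∧ PySem.Int.floordiv m i ≠ m then
           large ++ [PySem.Int.floordiv m i] else large)
    else trialLoop m (i + 1) small large
  else (small, large)
termination_by (m + 1 - i * i).toNat
decreasing_by
  all_goals
    have h2 : (i + 1) * (i + 1) = i * i + 2 * i + 1 := by ring
  all_goals omega

-- 'large.reverse(); d.append(small + large)'
def properRow (m : Int) : List Int :=
  (trialLoop m 1 [] []).1 ++ (trialLoop m 1 [] []).2.reverse

def divisors_to_alt (n : Int) : List (List Int) :=
  (PySem.List.pyRange 0 n).foldl (fun d m => d ++ [properRow m]) []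

-- ===== PRECONDITION & SPEC =====
def Spec_divisors_to (n : Int) (out : List (List Int)) : Prop := out = divisors_to_alt n
instance (n : Int) (out : List (List Int)) : Decidable (Spec_divisors_to n out) := by unfold Spec_divisors_to; infer_instance

-- ===== CLAIM (what is proved, stated in full; the proofs are below) =====
def Claim_equal_divisors_to : Prop := ∀ (n : Int), Dom_divisors_to n → Spec_divisors_to n (divisors_to n)

-- ===== LEMMAS AND PROOFS =====

theorem getD_modify_self (d : List (List Int)) (k : Nat) (hk : k < d.length) (v : Int) :
    (d.modify k (fun l => l ++ [v])).getD k [] = d.getD k [] ++ [v] := by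
  simp [List.getD_eq_getElem?_getD, List.getElem?_eq_getElem hk]

theorem getD_modify_ne (d : List (List Int)) (k m : Nat) (h : k ≠ m) (v : Int) :
    (d.modify k (fun l => l ++ [v])).getD m [] = d.getD m [] := by
  simp [List.getD_eq_getElem?_getD, h]

-- ---- A-side table lemmas ----

theorem divisorsInner_length (n i j : Int) (d : List (List Int)) :
    (divisorsInner n i j d).length = d.length := by
  fun_induction divisorsInner n i j d with
  | case1 j d h ih => rw [ih, List.length_modify]
  | case2 => rfl

theorem divisorsInner_getD (n i j : Int) (d : List (List Int)) (hi : 0 < i) (hj : 0 ≤ j)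
    (hlen : (d.length : Int) = n) (m : Nat) (hm : m < d.length) :
    (divisorsInner n i j d).getD m []
      = d.getD m [] ++ (if i ∣ (m : Int) ∧ i * j ≤ (m : Int) then [i] else []) := by
  revert hj hlen hm
  fun_induction divisorsInner n i j d with
  | case1 j d h ih =>
    intro hj hlen hm
    have hij : 0 ≤ i * j := mul_nonneg (le_of_lt hi) hj
    have hlen' : ((d.modify (i * j).toNat (fun l => l ++ [i])).length : Int) = n := by
      rw [List.length_modify]; exact hlen
    have hm' : m < (d.modify (i * j).toNat (fun l => l ++ [i])).length := by
      rw [List.length_modify]; exact hm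
    rw [ih (by omega) hlen' hm']
    by_cases hme : (m : Int) = i * j
    · have hk : (i * j).toNat = m := by omega
      have hcond : ¬ (i ∣ (m : Int) ∧ i * (j + 1) ≤ (m : Int)) := by
        rintro ⟨_, hle⟩
        have : i * (j + 1) = i * j + i := by ring
        omega
      have hcond2 : i ∣ (m : Int) ∧ i * j ≤ (m : Int) := ⟨⟨j, by omega⟩, by omega⟩
      rw [hk, getD_modify_self d m hm i, if_neg hcond, if_pos hcond2, List.append_nil]
    · have hk : (i * j).toNat ≠ m := by omega
      rw [getD_modify_ne d _ m hk i]
      have hiff : (i ∣ (m : Int) ∧ i * (j + 1) ≤ (m : Int)) ↔ (i ∣ (m : Int) ∧ i * j ≤ (m : Int)) := by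
        constructor
        · rintro ⟨hd, hle⟩
          have : i * j ≤ i * (j + 1) := by nlinarith
          exact ⟨hd, le_trans this hle⟩
        · rintro ⟨hd, hle⟩
          obtain ⟨q, hq⟩ := hd
          have hjq : j ≤ q := le_of_mul_le_mul_left (by omega) hi
          have hqj : q ≠ j := by rintro rfl; exact hme (by omega)
          have : i * (j + 1) ≤ i * q := by
            apply mul_le_mul_of_nonneg_left (by omega) (le_of_lt hi)
          exact ⟨⟨q, hq⟩, by omega⟩
      simp only [hiff]
  | case2 j d h =>
    intro hj hlen hm
    have hn : ¬ (i * j < n) := by tauto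
    have hcond : ¬ (i ∣ (m : Int) ∧ i * j ≤ (m : Int)) := by
      rintro ⟨_, hle⟩
      have hmn : (m : Int) < n := by omega
      omega
    rw [if_neg hcond, List.append_nil]

theorem foldA_length (n : Int) (L : List Int) (d : List (List Int)) :
    (L.foldl (fun d i => divisorsInner n i 2 d) d).length = d.length := by
  induction L generalizing d with
  | nil => rfl
  | cons i t ih => rw [List.foldl_cons, ih, divisorsInner_length]

theorem foldA_getD (n : Int) (L : List Int) (hL : ∀ i ∈ L, 0 < i) (d : List (List Int))
    (hlen : (d.length : Int) = n) (m : Nat) (hm : m < d.length) :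
    (L.foldl (fun d i => divisorsInner n i 2 d) d).getD m []
      = d.getD m [] ++ L.filter (fun i => decide (i ∣ (m : Int) ∧ i * 2 ≤ (m : Int))) := by
  induction L generalizing d with
  | nil => simp
  | cons i t ih =>
    have hi : 0 < i := hL i (List.mem_cons_self)
    have hlen' : ((divisorsInner n i 2 d).length : Int) = n := by
      rw [divisorsInner_length]; exact hlen
    have hm' : m < (divisorsInner n i 2 d).length := by
      rw [divisorsInner_length]; exact hm
    rw [List.foldl_cons, ih (fun x hx => hL x (List.mem_cons_of_mem _ hx)) _ hlen' hm',
        divisorsInner_getD n i 2 d hi (by omega) hlen m hm, List.filter_cons]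
    by_cases hc : i ∣ (m : Int) ∧ i * 2 ≤ (m : Int)
    · simp [hc]
    · simp [hc]

-- ---- B-side loop characterization ----

theorem trialLoop_spec (m i : Int) (small large : List Int) (hi : 0 < i) :
    trialLoop m i small large =
      (small ++ (PySem.List.pyRange i (m + 1)).filter
          (fun x => decide (x * x ≤ m ∧ x ∣ m ∧ x ≠ m)),
       large ++ ((PySem.List.pyRange i (m + 1)).filter
          (fun x => decide (x * x ≤ m ∧ x ∣ m ∧ m / x ≠ x ∧ m / x ≠ m))).map
            (fun x => m / x)) := by
  revert hi
  fun_induction trialLoop m i small large with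
  | case1 i small large h hmod ih =>
    intro hi
    have hdvd : i ∣ m := by
      have := PySem.Int.mod_eq_zero_iff_dvd m i
      simp only [beq_iff_eq] at hmod
      exact this.mp hmod
    have him : i ≤ m := by nlinarith [h.2]
    have hfd : PySem.Int.floordiv m i = m / i :=
      PySem.Int.floordiv_eq_ediv_of_pos (by omega)
    simp only [dite_eq_ite] at ih
    rw [PySem.List.pyRange_one_cons (show i < m + 1 by omega),
        List.filter_cons, List.filter_cons, ih (by omega), hfd]
    have hc1 : (decide (i * i ≤ m ∧ i ∣ m ∧ i ≠ m)) = decide (i ≠ m) := by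
      simp [h.2, hdvd]
    have hc2 : (decide (i * i ≤ m ∧ i ∣ m ∧ m / i ≠ i ∧ m / i ≠ m))
        = decide (m / i ≠ i ∧ m / i ≠ m) := by
      simp [h.2, hdvd]
    rw [hc1, hc2]
    simp only [Prod.mk.injEq]
    constructor
    · by_cases hne : i ≠ m <;> simp [hne]
    · by_cases hne : m / i ≠ i ∧ m / i ≠ m <;> simp [hne]
  | case2 i small large h hmod ih =>
    intro hi
    have hdvd : ¬ i ∣ m := by
      intro hd
      have := (PySem.Int.mod_eq_zero_iff_dvd m i).mpr hd
      simp [this] at hmod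
    have him : i ≤ m := by nlinarith [h.2]
    rw [PySem.List.pyRange_one_cons (show i < m + 1 by omega),
        List.filter_cons, List.filter_cons, ih (by omega)]
    simp [hdvd]
  | case3 i small large h =>
    intro hi
    have hii : ¬ (i * i ≤ m) := by tauto
    have hf1 : (PySem.List.pyRange i (m + 1)).filter
        (fun x => decide (x * x ≤ m ∧ x ∣ m ∧ x ≠ m)) = [] := by
      rw [List.filter_eq_nil_iff]
      intro x hx
      have hb := PySem.List.mem_pyRange_one.mp hx
      simp only [decide_eq_true_eq, not_and]
      intro hle
      nlinarith
    have hf2 : (PySem.List.pyRange i (m + 1)).filter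
        (fun x => decide (x * x ≤ m ∧ x ∣ m ∧ m / x ≠ x ∧ m / x ≠ m)) = [] := by
      rw [List.filter_eq_nil_iff]
      intro x hx
      have hb := PySem.List.mem_pyRange_one.mp hx
      simp only [decide_eq_true_eq, not_and]
      intro hle
      nlinarith
    rw [hf1, hf2]
    simp

-- ---- the two rows agree: both list the proper divisors of m, ascending ----

theorem rows_eq (n m : Int) (hm0 : 0 ≤ m) (hmn : m < n) :
    (PySem.List.pyRange 1 (PySem.Int.truncdiv (n + 2) 2)).filter
        (fun i => decide (i ∣ m ∧ i * 2 ≤ m))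
      = properRow m := by
  have hK : PySem.Int.truncdiv (n + 2) 2 = (n + 2) / 2 := by
    unfold PySem.Int.truncdiv
    exact Int.tdiv_eq_ediv_of_nonneg (by omega)
  unfold properRow
  rw [trialLoop_spec m 1 [] [] (by omega), hK]
  simp only [List.nil_append]
  -- both sides strictly increasing
  have hsortA : ((PySem.List.pyRange 1 ((n + 2) / 2)).filter
      (fun i => decide (i ∣ m ∧ i * 2 ≤ m))).Pairwise (· < ·) :=
    List.Pairwise.filter _ (PySem.List.pairwise_lt_pyRange_one _ _)
  have hsortS : ((PySem.List.pyRange 1 (m + 1)).filter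
      (fun x => decide (x * x ≤ m ∧ x ∣ m ∧ x ≠ m))).Pairwise (· < ·) :=
    List.Pairwise.filter _ (PySem.List.pairwise_lt_pyRange_one _ _)
  have hsortL : ((((PySem.List.pyRange 1 (m + 1)).filter
      (fun x => decide (x * x ≤ m ∧ x ∣ m ∧ m / x ≠ x ∧ m / x ≠ m))).map
        (fun x => m / x)).reverse).Pairwise (· < ·) := by
    rw [List.pairwise_reverse, List.pairwise_map]
    apply List.Pairwise.imp_of_mem (R := (· < ·))
    · intro a b ha hb hab
      have ha' := List.mem_filter.mp ha
      have hb' := List.mem_filter.mp hb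
      have hpa : a * a ≤ m ∧ a ∣ m ∧ m / a ≠ a ∧ m / a ≠ m := by simpa using ha'.2
      have hpb : b * b ≤ m ∧ b ∣ m ∧ m / b ≠ b ∧ m / b ≠ m := by simpa using hb'.2
      have ha2 := PySem.List.mem_pyRange_one.mp ha'.1
      have hb2 := PySem.List.mem_pyRange_one.mp hb'.1
      obtain ⟨qa, hqa⟩ := hpa.2.1
      obtain ⟨qb, hqb⟩ := hpb.2.1
      have hda : m / a = qa := by rw [hqa, Int.mul_ediv_cancel_left qa (by omega)]
      have hdb : m / b = qb := by rw [hqb, Int.mul_ediv_cancel_left qb (by omega)]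
      rw [hda, hdb]
      have hqb1 : 1 ≤ qb := by nlinarith [hpb.1]
      nlinarith
    · exact List.Pairwise.filter _ (PySem.List.pairwise_lt_pyRange_one _ _)
  have hcross : ∀ a ∈ (PySem.List.pyRange 1 (m + 1)).filter
      (fun x => decide (x * x ≤ m ∧ x ∣ m ∧ x ≠ m)),
      ∀ b ∈ (((PySem.List.pyRange 1 (m + 1)).filter
        (fun x => decide (x * x ≤ m ∧ x ∣ m ∧ m / x ≠ x ∧ m / x ≠ m))).map
          (fun x => m / x)).reverse, a < b := by
    intro a ha b hb
    have ha' := List.mem_filter.mp ha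
    have hpa : a * a ≤ m ∧ a ∣ m ∧ a ≠ m := by simpa using ha'.2
    have ha2 := PySem.List.mem_pyRange_one.mp ha'.1
    rw [List.mem_reverse, List.mem_map] at hb
    obtain ⟨x, hx, rfl⟩ := hb
    have hx' := List.mem_filter.mp hx
    have hpx : x * x ≤ m ∧ x ∣ m ∧ m / x ≠ x ∧ m / x ≠ m := by simpa using hx'.2
    have hx2 := PySem.List.mem_pyRange_one.mp hx'.1
    obtain ⟨q, hq⟩ := hpx.2.1
    have hdq : m / x = q := by rw [hq, Int.mul_ediv_cancel_left q (by omega)]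
    rw [hdq]
    have hqx : x < q := by
      rcases lt_or_ge x q with h' | h'
      · exact h'
      · exfalso
        rcases eq_or_lt_of_le h' with h'' | h''
        · exact hpx.2.2.1 (by rw [hdq, h''])
        · nlinarith [hpx.1]
    nlinarith [hpa.1]
  have hsortB : (((PySem.List.pyRange 1 (m + 1)).filter
        (fun x => decide (x * x ≤ m ∧ x ∣ m ∧ x ≠ m)))
      ++ (((PySem.List.pyRange 1 (m + 1)).filter
        (fun x => decide (x * x ≤ m ∧ x ∣ m ∧ m / x ≠ x ∧ m / x ≠ m))).map
          (fun x => m / x)).reverse).Pairwise (· < ·) :=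
    List.pairwise_append.mpr ⟨hsortS, hsortL, hcross⟩
  -- same members
  have hmem : ∀ y : Int,
      y ∈ (PySem.List.pyRange 1 ((n + 2) / 2)).filter
        (fun i => decide (i ∣ m ∧ i * 2 ≤ m))
      ↔ y ∈ (((PySem.List.pyRange 1 (m + 1)).filter
          (fun x => decide (x * x ≤ m ∧ x ∣ m ∧ x ≠ m)))
        ++ (((PySem.List.pyRange 1 (m + 1)).filter
          (fun x => decide (x * x ≤ m ∧ x ∣ m ∧ m / x ≠ x ∧ m / x ≠ m))).map
            (fun x => m / x)).reverse) := by
    intro y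
    rw [List.mem_append, List.mem_reverse, List.mem_map]
    constructor
    · intro hy
      have hy' := List.mem_filter.mp hy
      have hp : y ∣ m ∧ y * 2 ≤ m := by simpa using hy'.2
      have hb := PySem.List.mem_pyRange_one.mp hy'.1
      have hym : y ≠ m := by omega
      by_cases hyy : y * y ≤ m
      · left
        exact List.mem_filter.mpr ⟨PySem.List.mem_pyRange_one.mpr ⟨by omega, by omega⟩,
          by simp [hyy, hp.1, hym]⟩
      · right
        obtain ⟨q, hq⟩ := hp.1
        have hq1 : 1 ≤ q := by nlinarith
        have hq' : m = q * y := by rw [hq]; ring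
        have hdq : m / q = y := by rw [hq', Int.mul_ediv_cancel_left y (by omega)]
        have hqy : q < y := by nlinarith
        refine ⟨q, List.mem_filter.mpr ⟨PySem.List.mem_pyRange_one.mpr ⟨by omega, by omega⟩, ?_⟩, hdq⟩
        rw [hdq]
        simp only [decide_eq_true_eq]
        exact ⟨by nlinarith, ⟨y, hq'⟩, by omega, hym⟩
    · intro hy
      rcases hy with hy | ⟨x, hx, rfl⟩
      · have hy' := List.mem_filter.mp hy
        have hp : y * y ≤ m ∧ y ∣ m ∧ y ≠ m := by simpa using hy'.2
        have hb := PySem.List.mem_pyRange_one.mp hy'.1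
        obtain ⟨q, hq⟩ := hp.2.1
        have hq1 : 1 ≤ q := by nlinarith
        have hq2 : 2 ≤ q := by
          by_contra h'
          have hq1' : q = 1 := by omega
          rw [hq1'] at hq
          exact hp.2.2 (by omega)
        have h2y : y * 2 ≤ m := by nlinarith
        exact List.mem_filter.mpr ⟨PySem.List.mem_pyRange_one.mpr ⟨by omega, by omega⟩,
          by simp [hp.2.1, h2y]⟩
      · have hx' := List.mem_filter.mp hx
        have hpx : x * x ≤ m ∧ x ∣ m ∧ m / x ≠ x ∧ m / x ≠ m := by simpa using hx'.2
        have hb := PySem.List.mem_pyRange_one.mp hx'.1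
        obtain ⟨q, hq⟩ := hpx.2.1
        have hdq : m / x = q := by rw [hq, Int.mul_ediv_cancel_left q (by omega)]
        rw [hdq]
        have hq1 : 1 ≤ q := by nlinarith
        have hx2 : 2 ≤ x := by
          by_contra h'
          have hx1 : x = 1 := by omega
          rw [hx1] at hq
          exact hpx.2.2.2 (by rw [hdq]; omega)
        have h2q : q * 2 ≤ m := by nlinarith
        exact List.mem_filter.mpr ⟨PySem.List.mem_pyRange_one.mpr ⟨by omega, by omega⟩,
          by simp [h2q]; exact ⟨x, by rw [hq]; ring⟩⟩
  have hperm := (List.perm_ext_iff_of_nodup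
    (hsortA.imp (fun h => ne_of_lt h)) (hsortB.imp (fun h => ne_of_lt h))).mpr hmem
  exact List.Perm.eq_of_pairwise (fun a b _ _ h1 h2 => by omega) hsortA hsortB hperm

-- ===== VERDICT (by name: the statement is the Claim_ definition above) =====
theorem divisors_to_spec : Claim_equal_divisors_to := by
  intro n _
  unfold Spec_divisors_to divisors_to
  rw [PySem.List.foldl_append_singleton_eq_map (fun _ => ([] : List Int)), List.nil_append,
      show divisors_to_alt n = (PySem.List.pyRange 0 n).map properRow from by
        unfold divisors_to_alt
        rw [PySem.List.foldl_append_singleton_eq_map properRow, List.nil_append]]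
  set d0 : List (List Int) := (PySem.List.pyRange 0 n).map (fun _ => ([] : List Int)) with hd0
  have hlen0 : d0.length = (PySem.List.pyRange 0 n).length := by rw [hd0, List.length_map]
  apply List.ext_getElem
  · rw [foldA_length, hlen0, List.length_map]
  · intro m h1 h2
    have hmlt : m < (PySem.List.pyRange 0 n).length := by
      rw [foldA_length, hlen0] at h1; exact h1
    have hmn : (m : Int) < n := by
      rw [PySem.List.length_pyRange_one] at hmlt; omega
    have hm0 : m < d0.length := by rw [hlen0]; exact hmlt
    have hlenI : (d0.length : Int) = n := by
      rw [hlen0, PySem.List.length_pyRange_one]; omega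
    have hLA : ∀ i ∈ PySem.List.pyRange 1 (PySem.Int.truncdiv (n + 2) 2), 0 < i := by
      intro i hi
      have := PySem.List.mem_pyRange_one.mp hi
      omega
    rw [← List.getD_eq_getElem _ [] h1,
        foldA_getD n _ hLA d0 hlenI m hm0]
    have hinit : d0.getD m [] = [] := by
      rw [hd0, List.getD_eq_getElem?_getD, List.getElem?_map]
      cases (PySem.List.pyRange 0 n)[m]? <;> simp
    rw [hinit, List.nil_append, rows_eq n (m : Int) (by omega) hmn,
        List.getElem_map, PySem.List.getElem_pyRange_one]
    norm_num
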